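-- pv_equiv track=rewrite | github.com/ai-wes/hmwmc | score_logging.py | _group_metrics
-- ===== SOURCE A (Python) =====
-- from typing import Iterable, Mapping, Optional
--
-- _METRIC_GROUPS: list[tuple[str, list[str]]] = [
--     ("Loss",     ["total", "next_step", "aux_latent", "q_loss", "holder_loss",
--                   "loss/", "text_entropy", "stress"]),
--     ("Accuracy", ["latent_acc", "entity_acc", "binary_acc", "holder_acc",
--                   "qacc/", "who_holds_token", "who_was_first_tagged",
--                   "what_was_true_rule"]),
--     ("PNN",      ["pnn_"]),
--     ("HPM",      ["hpm_"]),
-- ]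
--
-- def _group_metrics(
--     metrics: Mapping[str, float],
-- ) -> list[tuple[str, list[str]]]:
--     """Partition metric keys into ordered groups. Every key appears exactly once."""
--     buckets: dict[str, list[str]] = {label: [] for label, _ in _METRIC_GROUPS}
--     buckets["Other"] = []
--     assigned: set[str] = set()
--
--     for key in metrics:
--         placed = False
--         for label, prefixes in _METRIC_GROUPS:
--             for pfx in prefixes:
--                 if key == pfx or key.startswith(pfx):
--                     buckets[label].append(key)
--                     assigned.add(key)
--                     placed = True
--                     break
--             if placed:
--                 break
--         if not placed:
--             buckets["Other"].append(key)
--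
--     result: list[tuple[str, list[str]]] = []
--     for label, _ in _METRIC_GROUPS:
--         if buckets[label]:
--             result.append((label, buckets[label]))
--     if buckets["Other"]:
--         result.append(("Other", buckets["Other"]))
--     return result
-- ===== SOURCE B (Python) =====
-- from typing import Mapping
--
-- _METRIC_GROUPS: list[tuple[str, list[str]]] = [
--     ("Loss",     ["total", "next_step", "aux_latent", "q_loss", "holder_loss",
--                   "loss/", "text_entropy", "stress"]),
--     ("Accuracy", ["latent_acc", "entity_acc", "binary_acc", "holder_acc",
--                   "qacc/", "who_holds_token", "who_was_first_tagged",
--                   "what_was_true_rule"]),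
--     ("PNN",      ["pnn_"]),
--     ("HPM",      ["hpm_"]),
-- ]
--
-- def _classify(key: str) -> str:
--     """Label of the first group one of whose prefixes matches (startswith subsumes equality)."""
--     for label, prefixes in _METRIC_GROUPS:
--         if any(key.startswith(p) for p in prefixes):
--             return label
--     return "Other"
--
-- def _group_metrics(metrics: Mapping[str, float]) -> list[tuple[str, list[str]]]:
--     result: list[tuple[str, list[str]]] = []
--     for label, _ in _METRIC_GROUPS + [("Other", [])]:
--         bucket = [k for k in metrics if _classify(k) == label]
--         if bucket:
--             result.append((label, bucket))
--     return result
-- ===== Notes on version B (the rewrite author's own statement) =====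
-- stated objective: alternative
-- what changed: A scans keys in an outer loop, dispatching each into a mutable bucket dict via a nested prefix loop with break flags; B inverts the traversal: a pure first-matching-group classifier, then one filter pass over the keys per output label in group order, appending non-empty buckets.
import Mathlib
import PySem

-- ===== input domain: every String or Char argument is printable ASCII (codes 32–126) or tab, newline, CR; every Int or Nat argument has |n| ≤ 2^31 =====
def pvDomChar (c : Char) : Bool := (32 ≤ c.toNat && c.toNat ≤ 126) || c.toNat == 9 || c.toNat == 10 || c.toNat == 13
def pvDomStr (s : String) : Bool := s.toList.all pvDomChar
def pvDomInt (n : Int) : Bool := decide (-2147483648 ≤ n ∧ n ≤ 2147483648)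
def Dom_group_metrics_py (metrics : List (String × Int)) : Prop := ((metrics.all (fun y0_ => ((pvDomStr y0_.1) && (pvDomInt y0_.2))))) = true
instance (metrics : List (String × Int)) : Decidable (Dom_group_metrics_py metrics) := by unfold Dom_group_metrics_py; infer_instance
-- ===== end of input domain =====

-- B replaces A's key-outer/group-inner dispatch into a mutable bucket dict by a pure classifier
-- plus one ordered filter pass per label (alternative decomposition, same cost).
-- The dict argument is an association list; both ports iterate its keys (first occurrences, in order),
-- exactly Python's iteration over the dict.

-- the module constant _METRIC_GROUPS
def metricGroups : List (String × List String) :=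
  [("Loss",     ["total", "next_step", "aux_latent", "q_loss", "holder_loss",
                 "loss/", "text_entropy", "stress"]),
   ("Accuracy", ["latent_acc", "entity_acc", "binary_acc", "holder_acc",
                 "qacc/", "who_holds_token", "who_was_first_tagged",
                 "what_was_true_rule"]),
   ("PNN",      ["pnn_"]),
   ("HPM",      ["hpm_"])]

-- ===== PORT A =====
-- inner 'for pfx in prefixes: if key == pfx or key.startswith(pfx): …; break' as a recursion returning whether a prefix matched
def aMatch (key : String) : List String → Bool
  | [] => false
  | p :: ps => if key == p || PySem.Str.startswith key p then true else aMatch key ps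

-- 'for label, prefixes in _METRIC_GROUPS: … if placed: break' — first matching label, none = not placed
def aPlace (key : String) : List (String × List String) → Option String
  | [] => none
  | g :: rest => if aMatch key g.2 then some g.1 else aPlace key rest

-- Note: A's local set 'assigned' is written but never read, so it is not carried in the port.
def group_metrics_py (metrics : List (String × Int)) : List (String × List String) :=
  let buckets0 : PySem.Dict String (List String) :=
    ((metricGroups.foldl (fun d g => d.insert g.1 ([] : List String)) PySem.Dict.empty).insert "Other" [])
  let keys := PySem.List.dedup (metrics.map (·.1))   -- 'for key in metrics': the dict's keys
  let buckets := keys.foldl (fun d key =>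
      match aPlace key metricGroups with
      | some label => d.modify label [] (· ++ [key])   -- buckets[label].append(key)
      | none => d.modify "Other" [] (· ++ [key])) buckets0
  let res := metricGroups.foldl (fun r g =>
      if buckets.getD g.1 [] ≠ [] then r ++ [(g.1, buckets.getD g.1 [])] else r) []
  if buckets.getD "Other" [] ≠ [] then res ++ [("Other", buckets.getD "Other" [])] else res

-- ===== PORT B =====
def classify (key : String) : String :=
  match metricGroups.find? (fun g => g.2.any (fun p => PySem.Str.startswith key p)) with
  | some g => g.1
  | none => "Other"

def group_metrics_py_alt (metrics : List (String × Int)) : List (String × List String) :=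
  let keys := PySem.List.dedup (metrics.map (·.1))   -- '[k for k in metrics …]': the dict's keys
  (metricGroups ++ [("Other", [])]).foldl (fun (r : List (String × List String)) (g : String × List String) =>
      let bucket := keys.filter (fun k => classify k == g.1)
      if bucket ≠ [] then r ++ [(g.1, bucket)] else r) []

-- ===== PRECONDITION & SPEC =====
def Spec_group_metrics_py (metrics : List (String × Int)) (out : List (String × List String)) : Prop := out = group_metrics_py_alt metrics
instance (metrics : List (String × Int)) (out : List (String × List String)) : Decidable (Spec_group_metrics_py metrics out) := by unfold Spec_group_metrics_py; infer_instance

-- ===== CLAIM (what is proved, stated in full; the proofs are below) =====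
def Claim_equal_group_metrics_py : Prop := ∀ (metrics : List (String × Int)), Dom_group_metrics_py metrics → Spec_group_metrics_py metrics (group_metrics_py metrics)

-- ===== LEMMAS AND PROOFS =====

theorem aMatch_eq_any (key : String) (ps : List String) :
    aMatch key ps = ps.any (fun p => PySem.Str.startswith key p) := by
  induction ps with
  | nil => rfl
  | cons p ps ih =>
    simp only [aMatch, List.any_cons, ih]
    by_cases h : key = p
    · subst h
      have hc : PySem.Chars.startswith key.toList key.toList = true := by
        rw [PySem.Chars.startswith_iff]
      simp [hc]
    · cases PySem.Str.startswith key p <;> simp [h]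

theorem aPlace_getD (key : String) (gs : List (String × List String)) :
    (aPlace key gs).getD "Other"
    = (match gs.find? (fun g => g.2.any (fun p => PySem.Str.startswith key p)) with
       | some g => g.1
       | none => "Other") := by
  induction gs with
  | nil => rfl
  | cons g gs ih =>
    simp only [aPlace, aMatch_eq_any, List.find?_cons]
    cases g.2.any (fun p => PySem.Str.startswith key p) <;> simp [ih]

theorem aPlace_getD_eq_classify (key : String) :
    (aPlace key metricGroups).getD "Other" = classify key := by
  unfold classify
  exact aPlace_getD key metricGroups

theorem d0_getD (c : String) :
    ((metricGroups.foldl (fun d g => d.insert g.1 ([] : List String)) PySem.Dict.empty).insert "Other" []).getD c [] = [] := by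
  simp [metricGroups, List.foldl, PySem.Dict.getD_insert, PySem.Dict.getD_empty]

theorem buckets_getD (keys : List String) (c : String) :
    (keys.foldl (fun d key =>
      match aPlace key metricGroups with
      | some label => d.modify label [] (· ++ [key])
      | none => d.modify "Other" [] (· ++ [key]))
      ((metricGroups.foldl (fun d g => d.insert g.1 ([] : List String)) PySem.Dict.empty).insert "Other" [])).getD c []
    = keys.filter (fun k => classify k == c) := by
  have hfun : (fun (d : PySem.Dict String (List String)) (key : String) =>
      match aPlace key metricGroups with
      | some label => d.modify label [] (· ++ [key])
      | none => d.modify "Other" [] (· ++ [key]))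
      = fun d key => d.modify (classify key) [] (· ++ [key]) := by
    funext d key
    rw [← aPlace_getD_eq_classify]
    cases aPlace key metricGroups <;> simp
  rw [hfun]
  have hmap : (keys.foldl (fun (d : PySem.Dict String (List String)) key => d.modify (classify key) [] (· ++ [key]))
      ((metricGroups.foldl (fun d g => d.insert g.1 ([] : List String)) PySem.Dict.empty).insert "Other" []))
      = ((keys.map (fun k => (classify k, k))).foldl (fun d p => d.modify p.1 [] (· ++ [p.2]))
      ((metricGroups.foldl (fun d g => d.insert g.1 ([] : List String)) PySem.Dict.empty).insert "Other" [])) := by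
    rw [List.foldl_map]
  rw [hmap, PySem.Dict.getD_foldl_modify_append, d0_getD]
  simp [List.filter_map, Function.comp_def]

theorem assemble (keys : List String) :
    (let buckets := keys.foldl (fun d key =>
      match aPlace key metricGroups with
      | some label => d.modify label [] (· ++ [key])
      | none => d.modify "Other" [] (· ++ [key]))
      ((metricGroups.foldl (fun d g => d.insert g.1 ([] : List String)) PySem.Dict.empty).insert "Other" [])
     let res := metricGroups.foldl (fun r g =>
      if buckets.getD g.1 [] ≠ [] then r ++ [(g.1, buckets.getD g.1 [])] else r) []
     if buckets.getD "Other" [] ≠ [] then res ++ [("Other", buckets.getD "Other" [])] else res)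
    = (metricGroups ++ [("Other", [])]).foldl (fun (r : List (String × List String)) (g : String × List String) =>
      let bucket := keys.filter (fun k => classify k == g.1)
      if bucket ≠ [] then r ++ [(g.1, bucket)] else r) [] := by
  simp only [List.foldl_append, List.foldl_cons, List.foldl_nil, buckets_getD]

-- ===== VERDICT (by name: the statement is the Claim_ definition above) =====
theorem group_metrics_py_spec : Claim_equal_group_metrics_py := by
  intro metrics _
  unfold Spec_group_metrics_py group_metrics_py group_metrics_py_alt
  exact assemble (PySem.List.dedup (metrics.map (·.1)))
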